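-- pv_equiv track=rewrite | github.com/johandicap/rosbag-image-tools | rosbag_details.py | find_stereo_pairs
-- ===== SOURCE A (Python) =====
-- from typing import Dict, List, Tuple, cast
--
-- def find_stereo_pairs(topics):
--     # Identify pairs (as two indices)
--     topics_lr = [t.replace("left", "lr").replace("right", "lr") for t in topics]
--     index_pairs: List[Tuple[int, int]] = []
--     for i in range(len(topics_lr)):
--         for j in range(i + 1, len(topics_lr)):
--             if topics_lr[i] == topics_lr[j]:
--                 index_pairs.append((i, j))
--     # Create list of stereo pairs
--     stereo_pairs: List[Tuple[str, str]] = []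
--     for i, j in index_pairs:
--         stereo_pairs.append((topics[i], topics[j]))
--     # Create list of remaining topics
--     all_indices = list(range(len(topics_lr)))
--     used_indices = [item for pair in index_pairs for item in pair]
--     remaining_indices = sorted(set(all_indices) - set(used_indices))
--     remaining_topics: List[str] = [topics[i] for i in remaining_indices]
--     return stereo_pairs, remaining_topics
-- ===== SOURCE B (Python) =====
-- def find_stereo_pairs(topics):
--     # Group indices by normalized name (left/right -> lr); emit each index's
--     # later group-mates in one pass, which yields the pairs in (i, j) order
--     # without the quadratic all-pairs scan; singleton groups are the leftovers.
--     norm = [t.replace("left", "lr").replace("right", "lr") for t in topics]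
--     groups = {}
--     for idx, name in enumerate(norm):
--         groups.setdefault(name, []).append(idx)
--     stereo_pairs = []
--     remaining_topics = []
--     for i, name in enumerate(norm):
--         g = groups[name]
--         if len(g) == 1:
--             remaining_topics.append(topics[i])
--         else:
--             for j in g:
--                 if j > i:
--                     stereo_pairs.append((topics[i], topics[j]))
--     return stereo_pairs, remaining_topics
-- ===== Notes on version B (the rewrite author's own statement) =====
-- stated objective: faster
-- what changed: B builds a dict grouping topic indices by normalized name in one pass and emits each index's later group-mates (and singleton groups as leftovers), replacing A's O(n^2) all-pairs index scan and set-difference pass.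
import Mathlib
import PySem

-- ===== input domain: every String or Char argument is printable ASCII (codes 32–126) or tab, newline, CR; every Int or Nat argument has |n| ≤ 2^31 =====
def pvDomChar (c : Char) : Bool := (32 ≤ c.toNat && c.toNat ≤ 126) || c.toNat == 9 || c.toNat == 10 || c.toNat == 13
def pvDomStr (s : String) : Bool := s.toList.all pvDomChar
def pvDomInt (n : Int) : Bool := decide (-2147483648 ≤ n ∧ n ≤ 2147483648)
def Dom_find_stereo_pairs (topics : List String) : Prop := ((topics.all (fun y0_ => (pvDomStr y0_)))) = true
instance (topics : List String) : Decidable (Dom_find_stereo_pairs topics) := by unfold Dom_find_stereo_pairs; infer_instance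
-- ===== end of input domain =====

-- B replaces A's quadratic all-pairs index scan by a dict grouping indices per
-- normalized topic name, emitting each index's later group-mates in one pass.

-- ===== PORT A =====
-- t.replace("left", "lr").replace("right", "lr")
def pvNorm (t : String) : String :=
  PySem.Str.replace (PySem.Str.replace t "left" "lr") "right" "lr"

def find_stereo_pairs (topics : List String) : (List (String × String)) × List String :=
  let topics_lr := topics.map pvNorm
  let n : Int := PySem.List.len topics_lr
  let index_pairs : List (Int × Int) :=
    (PySem.List.pyRange 0 n 1).foldl (fun acc i =>
      (PySem.List.pyRange (i + 1) n 1).foldl (fun acc2 j =>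
        if PySem.List.pyGetD topics_lr i "" == PySem.List.pyGetD topics_lr j "" then
          acc2 ++ [(i, j)]
        else acc2) acc) []
  let stereo_pairs : List (String × String) :=
    index_pairs.foldl (fun acc p =>
      acc ++ [(PySem.List.pyGetD topics p.1 "", PySem.List.pyGetD topics p.2 "")]) []
  let all_indices := PySem.List.pyRange 0 n 1
  let used_indices : List Int := index_pairs.foldl (fun acc p => acc ++ [p.1, p.2]) []
  let remaining_indices :=
    PySem.List.sorted (PySem.Set.diff (PySem.Set.ofList all_indices) (PySem.Set.ofList used_indices))
      (fun x => x) false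
  let remaining_topics := remaining_indices.map (fun i => PySem.List.pyGetD topics i "")
  (stereo_pairs, remaining_topics)

-- ===== PORT B =====
def find_stereo_pairs_alt (topics : List String) : (List (String × String)) × List String :=
  let norm := topics.map pvNorm
  -- groups.setdefault(name, []).append(idx)
  let groups : PySem.Dict String (List Int) :=
    (PySem.List.enumerate norm).foldl
      (fun d p => d.modify p.2 [] (fun g => g ++ [p.1])) PySem.Dict.empty
  (PySem.List.enumerate norm).foldl
    (fun acc p =>
      let g := groups.getD p.2 []
      if PySem.List.len g == 1 then
        (acc.1, acc.2 ++ [PySem.List.pyGetD topics p.1 ""])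
      else
        (g.foldl (fun sp j =>
            if p.1 < j then
              sp ++ [(PySem.List.pyGetD topics p.1 "", PySem.List.pyGetD topics j "")]
            else sp) acc.1,
         acc.2))
    ([], [])

-- ===== PRECONDITION & SPEC =====
def Spec_find_stereo_pairs (topics : List String) (out : (List (String × String)) × List String) : Prop := out = find_stereo_pairs_alt topics
instance (topics : List String) (out : (List (String × String)) × List String) : Decidable (Spec_find_stereo_pairs topics out) := by unfold Spec_find_stereo_pairs; infer_instance

-- ===== CLAIM (what is proved, stated in full; the proofs are below) =====
def Claim_equal_find_stereo_pairs : Prop := ∀ (topics : List String), Dom_find_stereo_pairs topics → Spec_find_stereo_pairs topics (find_stereo_pairs topics)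

-- ===== LEMMAS AND PROOFS =====

-- the index group of a normalized name c: all indices of L holding c, in order
def pvGrp (L : List String) (c : String) : List Int :=
  (PySem.List.pyRange 0 (PySem.List.len L)).filter (fun j => PySem.List.pyGetD L j "" == c)

-- A's index_pairs, written as a flatMap
def pvPairs (L : List String) : List (Int × Int) :=
  (PySem.List.pyRange 0 (PySem.List.len L)).flatMap (fun i =>
    ((PySem.List.pyRange (i + 1) (PySem.List.len L)).filter
        (fun j => PySem.List.pyGetD L i "" == PySem.List.pyGetD L j "")).map (fun j => (i, j)))

theorem pvMem_grp (L : List String) (c : String) (j : Int) :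
    j ∈ pvGrp L c ↔ 0 ≤ j ∧ j < PySem.List.len L ∧ PySem.List.pyGetD L j "" = c := by
  simp [pvGrp, List.mem_filter, PySem.List.mem_pyRange_one, and_assoc]

theorem pvNodup_grp (L : List String) (c : String) : (pvGrp L c).Nodup :=
  (PySem.List.nodup_pyRange_one _ _).filter _

-- B's grouping loop, with a generalized starting dict (keys are the SECOND components)
theorem pvGrp_aux (l : List (Int × String)) (d : PySem.Dict String (List Int)) (c : String) :
    (l.foldl (fun d p => d.modify p.2 [] (fun g => g ++ [p.1])) d).getD c []
      = d.getD c [] ++ (l.filter (fun p => p.2 == c)).map (·.1) := by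
  induction l generalizing d with
  | nil => simp
  | cons p l ih =>
    simp only [List.foldl_cons, ih, List.filter_cons]
    by_cases h : p.2 = c
    · subst h
      rw [PySem.Dict.getD_modify_self]
      simp
    · rw [PySem.Dict.getD_modify, if_neg (fun hc => h hc.symm)]
      simp [h]

theorem pvGrp_eq (L : List String) (c : String) :
    ((PySem.List.enumerate L).foldl
        (fun d p => d.modify p.2 [] (fun g => g ++ [p.1])) PySem.Dict.empty).getD c []
      = pvGrp L c := by
  rw [pvGrp_aux]
  simp [PySem.List.enumerate_eq_map_pyRange L "", List.filter_map, List.map_map,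
    Function.comp_def, pvGrp]

-- A's nested index loop is the flatMap pvPairs
theorem pvA_pairs (L : List String) :
    ((PySem.List.pyRange 0 (PySem.List.len L) 1).foldl (fun acc i =>
        (PySem.List.pyRange (i + 1) (PySem.List.len L) 1).foldl (fun acc2 j =>
          if PySem.List.pyGetD L i "" == PySem.List.pyGetD L j "" then
            acc2 ++ [(i, j)]
          else acc2) acc) [])
      = pvPairs L := by
  rw [PySem.List.foldl_congr_mem _ _
      (fun acc i => acc ++ ((PySem.List.pyRange (i + 1) (PySem.List.len L)).filter
          (fun j => PySem.List.pyGetD L i "" == PySem.List.pyGetD L j "")).map (fun j => (i, j)))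
      _ (fun acc i _ => PySem.List.foldl_append_if _ _ _ _)]
  rw [PySem.List.foldl_append_eq_flatMap]
  simp [pvPairs]

theorem pvMem_pairs (L : List String) (q : Int × Int) :
    q ∈ pvPairs L ↔ 0 ≤ q.1 ∧ q.1 < q.2 ∧ q.2 < PySem.List.len L ∧
      PySem.List.pyGetD L q.1 "" = PySem.List.pyGetD L q.2 "" := by
  simp only [pvPairs, List.mem_flatMap, List.mem_map, List.mem_filter,
    PySem.List.mem_pyRange_one, beq_iff_eq]
  constructor
  · rintro ⟨i, ⟨hi0, hin⟩, j, ⟨⟨hj1, hj2⟩, hname⟩, rfl⟩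
    exact ⟨hi0, by omega, hj2, hname⟩
  · rintro ⟨h1, h2, h3, h4⟩
    exact ⟨q.1, ⟨h1, by omega⟩, q.2, ⟨⟨by omega, h3⟩, h4⟩, rfl⟩

-- the group of index i, restricted to later indices, is A's inner filtered range
theorem pvRange_filter (L : List String) (i : Int) (h0 : 0 ≤ i) (hn : i < PySem.List.len L) :
    (pvGrp L (PySem.List.pyGetD L i "")).filter (fun j => decide (i < j))
      = (PySem.List.pyRange (i + 1) (PySem.List.len L)).filter
          (fun j => PySem.List.pyGetD L i "" == PySem.List.pyGetD L j "") := by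
  unfold pvGrp
  rw [List.filter_comm]
  rw [PySem.List.pyRange_one_append 0 (i + 1) (PySem.List.len L) (by omega) (by omega),
    List.filter_append]
  have h1 : (PySem.List.pyRange 0 (i + 1)).filter (fun j => decide (i < j)) = [] := by
    rw [List.filter_eq_nil_iff]
    intro j hj
    rw [PySem.List.mem_pyRange_one] at hj
    simp; omega
  have h2 : (PySem.List.pyRange (i + 1) (PySem.List.len L)).filter (fun j => decide (i < j))
      = PySem.List.pyRange (i + 1) (PySem.List.len L) := by
    rw [List.filter_eq_self]
    intro j hj
    rw [PySem.List.mem_pyRange_one] at hj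
    simp; omega
  rw [h1, h2, List.nil_append]
  exact List.filter_congr (fun j _ => Bool.beq_comm)

-- B's main loop, with the group dict abstracted and both accumulators generalized
theorem pvB_loop (topics : List String) (G : PySem.Dict String (List Int))
    (l : List (Int × String)) (a : List (String × String)) (b : List String) :
    (l.foldl (fun acc p =>
        if PySem.List.len (G.getD p.2 []) == 1 then
          (acc.1, acc.2 ++ [PySem.List.pyGetD topics p.1 ""])
        else
          ((G.getD p.2 []).foldl (fun sp j =>
              if p.1 < j then
                sp ++ [(PySem.List.pyGetD topics p.1 "", PySem.List.pyGetD topics j "")]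
              else sp) acc.1,
           acc.2)) (a, b))
      = (a ++ l.flatMap (fun p =>
            if PySem.List.len (G.getD p.2 []) == 1 then []
            else ((G.getD p.2 []).filter (fun j => decide (p.1 < j))).map
                (fun j => (PySem.List.pyGetD topics p.1 "", PySem.List.pyGetD topics j ""))),
         b ++ (l.filter (fun p => PySem.List.len (G.getD p.2 []) == 1)).map
            (fun p => PySem.List.pyGetD topics p.1 "")) := by
  induction l generalizing a b with
  | nil => simp
  | cons p l ih =>
    simp only [List.foldl_cons, List.flatMap_cons, List.filter_cons]
    by_cases h : (PySem.List.len (G.getD p.2 []) == 1) = true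
    · simp only [h, if_true, ih]
      simp
    · simp only [h, if_false, Bool.false_eq_true]
      rw [PySem.List.foldl_append_ite (fun j => p.1 < j)
        (fun j => (PySem.List.pyGetD topics p.1 "", PySem.List.pyGetD topics j "")) _ a]
      rw [ih]
      simp

-- a group whose length reads 1 is exactly the singleton of its own index
theorem pvGrp_singleton (L : List String) (i : Int) (h0 : 0 ≤ i) (hn : i < PySem.List.len L)
    (hone : (PySem.List.len (pvGrp L (PySem.List.pyGetD L i "")) == 1) = true) :
    pvGrp L (PySem.List.pyGetD L i "") = [i] := by
  have hiS : i ∈ pvGrp L (PySem.List.pyGetD L i "") := (pvMem_grp L _ i).mpr ⟨h0, hn, rfl⟩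
  have hlen : (pvGrp L (PySem.List.pyGetD L i "")).length = 1 := by
    rw [PySem.List.len_eq, beq_iff_eq] at hone
    exact_mod_cast hone
  obtain ⟨a, ha⟩ := List.length_eq_one_iff.mp hlen
  rw [ha] at hiS ⊢
  simp at hiS
  rw [hiS]

-- a Nodup list containing i has length 1 iff all its members are i
theorem pvLen_one_iff {S : List Int} {i : Int} (hnd : S.Nodup) (hi : i ∈ S) :
    S.length = 1 ↔ ∀ j ∈ S, j = i := by
  constructor
  · intro h j hj
    obtain ⟨a, rfl⟩ := List.length_eq_one_iff.mp h
    simp at hi hj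
    omega
  · intro h
    rcases S with _ | ⟨a, S'⟩
    · simp at hi
    rcases S' with _ | ⟨b, S''⟩
    · rfl
    · have ha := h a (by simp)
      have hb := h b (by simp)
      rw [List.nodup_cons] at hnd
      exact absurd (by simp [ha, hb] : a ∈ b :: S'') hnd.1

-- index i is in a pair iff its group is not a singleton
theorem pvSingleton_iff (L : List String) (i : Int) (h0 : 0 ≤ i) (hn : i < PySem.List.len L) :
    (PySem.List.len (pvGrp L (PySem.List.pyGetD L i "")) == 1)
      = !((pvPairs L).flatMap (fun p => [p.1, p.2])).contains i := by
  have hiS : i ∈ pvGrp L (PySem.List.pyGetD L i "") := (pvMem_grp L _ i).mpr ⟨h0, hn, rfl⟩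
  have hnd := pvNodup_grp L (PySem.List.pyGetD L i "")
  have hU : i ∈ (pvPairs L).flatMap (fun p => [p.1, p.2]) ↔
      ∃ j, 0 ≤ j ∧ j < PySem.List.len L ∧ j ≠ i ∧
        PySem.List.pyGetD L j "" = PySem.List.pyGetD L i "" := by
    simp only [List.mem_flatMap]
    constructor
    · rintro ⟨q, hq, hiq⟩
      rw [pvMem_pairs] at hq
      obtain ⟨hq1, hq2, hq3, hq4⟩ := hq
      simp at hiq
      rcases hiq with rfl | rfl
      · exact ⟨q.2, by omega, hq3, by omega, by rw [hq4]⟩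
      · exact ⟨q.1, hq1, by omega, by omega, hq4⟩
    · rintro ⟨j, hj0, hjn, hji, hjname⟩
      rcases lt_or_gt_of_ne hji with h | h
      · exact ⟨(j, i), (pvMem_pairs L (j, i)).mpr ⟨hj0, h, hn, hjname⟩, by simp⟩
      · exact ⟨(i, j), (pvMem_pairs L (i, j)).mpr ⟨h0, h, hjn, hjname.symm⟩, by simp⟩
  have hkey : (PySem.List.len (pvGrp L (PySem.List.pyGetD L i "")) == 1) = true ↔
      ¬ i ∈ (pvPairs L).flatMap (fun p => [p.1, p.2]) := by
    rw [hU]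
    simp only [PySem.List.len_eq, beq_iff_eq, Nat.cast_eq_one]
    rw [pvLen_one_iff hnd hiS]
    constructor
    · rintro h ⟨j, hj0, hjn, hji, hjname⟩
      exact hji (h j ((pvMem_grp L _ j).mpr ⟨hj0, hjn, hjname⟩))
    · intro h j hj
      rw [pvMem_grp] at hj
      by_contra hji
      exact h ⟨j, hj.1, hj.2.1, hji, hj.2.2⟩
  apply Bool.coe_iff_coe.mp
  rw [hkey]
  rw [Bool.not_eq_true', ← Bool.not_eq_true, List.contains_eq_mem, decide_eq_true_eq]

theorem find_stereo_pairs_main (topics : List String) :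
    find_stereo_pairs topics = find_stereo_pairs_alt topics := by
  unfold find_stereo_pairs find_stereo_pairs_alt
  dsimp only
  set L := topics.map pvNorm with hLdef
  rw [pvA_pairs L]
  rw [PySem.List.foldl_append_singleton_eq_map
      (fun p => (PySem.List.pyGetD topics p.1 "", PySem.List.pyGetD topics p.2 "")) (pvPairs L) []]
  rw [PySem.List.foldl_append_eq_flatMap (fun p => [p.1, p.2]) (pvPairs L) []]
  rw [pvB_loop]
  simp only [pvGrp_eq, List.nil_append]
  rw [PySem.List.enumerate_eq_map_pyRange L ""]
  rw [List.flatMap_map, List.filter_map]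
  refine Prod.ext_iff.mpr ⟨?_, ?_⟩
  · -- stereo pairs component
    show (pvPairs L).map _ = _
    rw [pvPairs, List.map_flatMap]
    apply List.flatMap_congr
    intro i hi
    rw [PySem.List.mem_pyRange_one] at hi
    simp only [List.map_map, Function.comp_def]
    rw [← pvRange_filter L i hi.1 hi.2]
    by_cases hone : (PySem.List.len (pvGrp L (PySem.List.pyGetD L i "")) == 1) = true
    · rw [if_pos hone, pvGrp_singleton L i hi.1 hi.2 hone]
      simp
    · rw [if_neg hone]
  · -- remaining topics component
    have hall : PySem.Set.ofList (PySem.List.pyRange 0 (PySem.List.len L) 1)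
        = PySem.List.pyRange 0 (PySem.List.len L) 1 :=
      PySem.Set.ofList_eq_self_of_nodup _ (PySem.List.nodup_pyRange_one _ _)
    rw [hall]
    have hdiff : PySem.Set.diff (PySem.List.pyRange 0 (PySem.List.len L) 1)
        (PySem.Set.ofList ((pvPairs L).flatMap (fun p => [p.1, p.2])))
        = (PySem.List.pyRange 0 (PySem.List.len L) 1).filter
            (fun x => !(PySem.Set.ofList ((pvPairs L).flatMap (fun p => [p.1, p.2]))).contains x) := rfl
    rw [hdiff]
    rw [PySem.List.sorted_eq_of_perm_of_pairwise_lt _ _ _ (List.Perm.refl _)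
      ((PySem.List.pairwise_lt_pyRange_one _ _).filter _)]
    have hfc : (PySem.List.pyRange 0 (PySem.List.len L) 1).filter
        (fun x => !(PySem.Set.ofList ((pvPairs L).flatMap (fun p => [p.1, p.2]))).contains x)
        = (PySem.List.pyRange 0 (PySem.List.len L) 1).filter
            (fun i => PySem.List.len (pvGrp L (PySem.List.pyGetD L i "")) == 1) := by
      apply List.filter_congr
      intro i hi
      rw [PySem.List.mem_pyRange_one] at hi
      rw [pvSingleton_iff L i hi.1 hi.2]
      have : (PySem.Set.ofList ((pvPairs L).flatMap (fun p => [p.1, p.2]))).contains i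
          = ((pvPairs L).flatMap (fun p => [p.1, p.2])).contains i := by
        simp only [PySem.Set.contains_eq_listContains]
        rw [List.contains_eq_mem, List.contains_eq_mem]
        simp [PySem.Set.mem_ofList]
      rw [this]
    rw [hfc]
    simp [Function.comp_def]

-- ===== VERDICT (by name: the statement is the Claim_ definition above) =====
theorem find_stereo_pairs_spec : Claim_equal_find_stereo_pairs := by
  intro topics _
  unfold Spec_find_stereo_pairs
  exact find_stereo_pairs_main topics
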